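-- pv_equiv track=rewrite | github.com/anieto-pixel/ZarcFit-Demo | AuxiliaryClasses/WidgetTextBar.py | _sort_keys_by_suffix
-- ===== SOURCE A (Python) =====
-- def _sort_keys_by_suffix(keys):
--     """
--     Sorts keys based on their suffix.
--
--     Returns:
--         list: Ordered list of keys for display.
--     """
--     categorized_keys = {"h": [], "m": [], "l": [], "other": []}
--
--     for key in keys:
--         suffix = key[-1] if key[-1] in categorized_keys else "other"
--         categorized_keys[suffix].append(key)
--
--     # Sort within each category and return a merged list.
--     return (
--         sorted(categorized_keys["h"]) +
--         sorted(categorized_keys["m"]) +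
--         sorted(categorized_keys["l"]) +
--         sorted(categorized_keys["other"])
--     )
-- ===== SOURCE B (Python) =====
-- def _sort_keys_by_suffix(keys):
--     """Single sorted() pass with a composite (suffix-priority, key) sort key."""
--     order = {"h": 0, "m": 1, "l": 2}
--     return sorted(keys, key=lambda k: (order.get(k[-1], 3), k))
-- ===== Notes on version B (the rewrite author's own statement) =====
-- stated objective: idiomatic
-- what changed: Replaces the bucket dictionary, four per-bucket sorts and list concatenation with a single sorted() call on a composite (suffix-priority, key) sort key.
import Mathlib
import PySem

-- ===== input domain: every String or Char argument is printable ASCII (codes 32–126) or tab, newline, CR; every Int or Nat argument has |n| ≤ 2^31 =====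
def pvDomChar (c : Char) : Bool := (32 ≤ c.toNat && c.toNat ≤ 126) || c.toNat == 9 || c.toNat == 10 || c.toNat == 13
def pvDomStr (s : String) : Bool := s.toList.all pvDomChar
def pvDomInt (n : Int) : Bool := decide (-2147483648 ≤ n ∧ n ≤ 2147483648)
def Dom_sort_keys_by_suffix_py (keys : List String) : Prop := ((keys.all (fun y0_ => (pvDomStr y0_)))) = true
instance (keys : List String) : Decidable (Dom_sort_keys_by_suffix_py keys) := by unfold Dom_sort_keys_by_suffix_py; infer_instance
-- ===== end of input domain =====

-- B replaces A's bucket dictionary + four per-bucket sorts + concatenation with one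
-- sorted() call on a composite (suffix-priority, key) sort key (idiomatic, same cost).


-- ===== PORT A =====
-- Python's key[-1] is a one-character string; it is represented by its character
-- wrapped back into a String (exact for the membership test and dict lookups used here).
def pvLastStr (s : String) : Option String :=
  (PySem.Str.pyGet? s (-1)).map (fun c => String.singleton c)

-- the initial dict literal {"h": [], "m": [], "l": [], "other": []}
def pvD0 : PySem.Dict String (List String) :=
  PySem.Dict.ofList [("h", []), ("m", []), ("l", []), ("other", [])]

-- the body of A's for-loop: pick the suffix (membership test against the dict's keys),
-- then categorized_keys[suffix].append(key)
def pvStepA (d : PySem.Dict String (List String)) (key : String) :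
    PySem.Dict String (List String) :=
  let suffix : String :=
    match pvLastStr key with
    | some t => if d.contains t then t else "other"
    | none => "other"   -- Python raises IndexError here (empty key, excluded by Pre_)
  d.modify suffix [] (fun l => l ++ [key])

def sort_keys_by_suffix_py (keys : List String) : List String :=
  let categorized := keys.foldl pvStepA pvD0
  PySem.List.sorted (categorized.getD "h" []) (fun x => x) false ++
  PySem.List.sorted (categorized.getD "m" []) (fun x => x) false ++
  PySem.List.sorted (categorized.getD "l" []) (fun x => x) false ++
  PySem.List.sorted (categorized.getD "other" []) (fun x => x) false

-- ===== PORT B =====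
-- order.get(k[-1], 3): the first component of B's composite sort key
def pvKeyB (order : PySem.Dict String Int) (k : String) : Int :=
  match pvLastStr k with
  | some t => order.getD t 3
  | none => 3   -- Python raises IndexError here (empty key, excluded by Pre_)

def sort_keys_by_suffix_py_alt (keys : List String) : List String :=
  let order : PySem.Dict String Int := PySem.Dict.ofList [("h", 0), ("m", 1), ("l", 2)]
  PySem.List.sorted2 keys (fun k => pvKeyB order k) (fun k => k) false

-- ===== PRECONDITION & SPEC =====
-- Pre_ excludes lists containing the empty string: there both A and B raise
-- IndexError at key[-1].
def Pre_sort_keys_by_suffix_py (keys : List String) : Prop := ∀ k ∈ keys, k ≠ ""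
instance (keys : List String) : Decidable (Pre_sort_keys_by_suffix_py keys) := by
  unfold Pre_sort_keys_by_suffix_py; infer_instance

def pvWitness_sort_keys_by_suffix_py : List String := ["beach", "form", "tool", "x", "ah"]

def Spec_sort_keys_by_suffix_py (keys : List String) (out : List String) : Prop := out = sort_keys_by_suffix_py_alt keys
instance (keys : List String) (out : List String) : Decidable (Spec_sort_keys_by_suffix_py keys out) := by unfold Spec_sort_keys_by_suffix_py; infer_instance

-- ===== CLAIM (what is proved, stated in full; the proofs are below) =====
def Claim_equal_sort_keys_by_suffix_py : Prop := ∀ (keys : List String), Dom_sort_keys_by_suffix_py keys → Pre_sort_keys_by_suffix_py keys → Spec_sort_keys_by_suffix_py keys (sort_keys_by_suffix_py keys)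

-- ===== LEMMAS AND PROOFS =====

-- proof-side suffix classification: the string A's loop files key under
def pvSuf (k : String) : String :=
  match pvLastStr k with
  | some t => if t = "h" ∨ t = "m" ∨ t = "l" ∨ t = "other" then t else "other"
  | none => "other"

-- proof-side priority: the value B's first key component takes
def pvPr (k : String) : Int :=
  match pvLastStr k with
  | some t => if t = "h" then 0 else if t = "m" then 1 else if t = "l" then 2 else 3
  | none => 3

theorem pvPr_alt (k : String) :
    pvKeyB (PySem.Dict.ofList [("h", (0:Int)), ("m", 1), ("l", 2)]) k = pvPr k := by
  unfold pvKeyB pvPr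
  cases pvLastStr k with
  | none => rfl
  | some t =>
    simp only
    have h : (PySem.Dict.ofList [("h",(0:Int)),("m",1),("l",2)])
        = PySem.Dict.mk [("h",0),("m",1),("l",2)] := by decide
    rw [h, PySem.Dict.getD_eq_get?_getD, PySem.Dict.get?_mk_cons, PySem.Dict.get?_mk_cons,
        PySem.Dict.get?_mk_cons]
    simp only [beq_iff_eq]
    by_cases h1 : t = "h" <;> by_cases h2 : t = "m" <;> by_cases h3 : t = "l" <;>
      simp_all [eq_comm]
    rfl

-- for every key, A's suffix bucket and B's priority pick the same category
theorem pvSuf_pvPr (k : String) :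
    (pvSuf k = "h" ∧ pvPr k = 0) ∨ (pvSuf k = "m" ∧ pvPr k = 1) ∨
    (pvSuf k = "l" ∧ pvPr k = 2) ∨ (pvSuf k = "other" ∧ pvPr k = 3) := by
  unfold pvSuf pvPr
  cases pvLastStr k with
  | none => simp
  | some t =>
    by_cases h1 : t = "h" <;> by_cases h2 : t = "m" <;> by_cases h3 : t = "l" <;>
      by_cases h4 : t = "other" <;> simp_all

theorem pvPr_cases (k : String) : pvPr k = 0 ∨ pvPr k = 1 ∨ pvPr k = 2 ∨ pvPr k = 3 := by
  rcases pvSuf_pvPr k with ⟨_, h⟩ | ⟨_, h⟩ | ⟨_, h⟩ | ⟨_, h⟩ <;> simp [h]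

theorem pvSuf_mem (k : String) : pvSuf k ∈ (["h","m","l","other"] : List String) := by
  rcases pvSuf_pvPr k with ⟨h,_⟩|⟨h,_⟩|⟨h,_⟩|⟨h,_⟩ <;> simp [h]

-- A's loop is the suffix-keyed grouping loop (the dict's key set never changes)
theorem foldA_eq (keys : List String) (d : PySem.Dict String (List String))
    (hk : d.keys = ["h", "m", "l", "other"]) :
    keys.foldl pvStepA d =
      keys.foldl (fun d key => d.modify (pvSuf key) [] (fun l => l ++ [key])) d := by
  induction keys generalizing d with
  | nil => rfl
  | cons k ks ih =>
    have hstep : pvStepA d k = d.modify (pvSuf k) [] (fun l => l ++ [k]) := by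
      unfold pvStepA pvSuf
      cases pvLastStr k with
      | none => rfl
      | some t =>
        simp only
        rw [PySem.Dict.contains_eq_decide_mem_keys, hk]
        by_cases ht : t = "h" ∨ t = "m" ∨ t = "l" ∨ t = "other"
        · rcases ht with h|h|h|h <;> simp [h]
        · simp only [ht]
          simp [ht]
    have hcont : d.contains (pvSuf k) = true := by
      rw [PySem.Dict.contains_eq_decide_mem_keys, hk]
      simpa using pvSuf_mem k
    have hkeys : (d.modify (pvSuf k) [] (fun l => l ++ [k])).keys = ["h","m","l","other"] := by
      rw [PySem.Dict.keys_modify, PySem.Dict.keys_insert_of_contains _ _ hcont, hk]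
    simp only [List.foldl_cons, hstep]
    exact ih _ hkeys

theorem pvD0_getD (c : String) : pvD0.getD c [] = [] := by
  have h : pvD0 = PySem.Dict.mk [("h",[]),("m",[]),("l",[]),("other",[])] := by decide
  rw [h, PySem.Dict.getD_eq_get?_getD, PySem.Dict.get?_mk_cons, PySem.Dict.get?_mk_cons,
      PySem.Dict.get?_mk_cons, PySem.Dict.get?_mk_cons]
  split_ifs <;> rfl

-- each bucket of A's finished dict is a filter of keys
theorem bucketA (keys : List String) (c : String) :
    (keys.foldl pvStepA pvD0).getD c [] =
      keys.filter (fun k => pvSuf k == c) := by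
  rw [foldA_eq _ _ (by decide)]
  have h : keys.foldl (fun d key => d.modify (pvSuf key) [] (fun l => l ++ [key])) pvD0
      = (keys.map (fun k => (pvSuf k, k))).foldl
          (fun d p => d.modify p.1 [] (fun l => l ++ [p.2])) pvD0 := by
    rw [List.foldl_map]
  rw [h, PySem.Dict.getD_foldl_modify_append, pvD0_getD]
  simp [List.filter_map, List.map_map, Function.comp_def]

-- B's sort with a tuple key is the sort by the lexicographic product key
theorem sorted2_eq_sorted_lex (xs : List String) (f : String → Int) :
    PySem.List.sorted2 xs f (fun k => k) false =
      PySem.List.sorted xs (fun k => toLex (f k, k)) false := by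
  rw [PySem.List.sorted_eq_foldl_insertBy]
  show xs.foldl (fun acc x => PySem.List.insertBy _ x acc) [] =
       xs.foldl (fun acc x => PySem.List.insertBy _ x acc) []
  congr 1
  funext acc x
  congr 1
  funext a b
  show (decide (f a < f b) || (!decide (f b < f a) && decide (a < b)))
      = decide (toLex (f a, a) < toLex (f b, b))
  rcases lt_trichotomy (f a) (f b) with h | h | h
  · simp [Prod.Lex.lt_iff, h, lt_asymm h]
  · simp [Prod.Lex.lt_iff, h]
  · simp [Prod.Lex.lt_iff, h, lt_asymm h, ne_of_gt h]

theorem mem_S (keys : List String) (i : Int) (x : String)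
    (hx : x ∈ PySem.List.sorted (keys.filter (fun k => pvPr k == i)) (fun y => y) false) :
    pvPr x = i := by
  rw [PySem.List.mem_sorted] at hx
  exact by simpa using (List.mem_filter.1 hx).2

theorem S_pairwise (keys : List String) (i : Int) :
    (PySem.List.sorted (keys.filter (fun k => pvPr k == i)) (fun y => y) false).Pairwise
      (fun a b => (fun k => toLex (pvPr k, k)) a ≤ (fun k => toLex (pvPr k, k)) b) := by
  refine (PySem.List.sorted_pairwise _ (fun y => y)).imp_of_mem ?_
  intro a b ha hb hle
  have hpa := mem_S keys i a ha
  have hpb := mem_S keys i b hb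
  rw [Prod.Lex.le_iff]
  right
  exact ⟨by simp [hpa, hpb], hle⟩

theorem key_le (a b : String) {i j : Int} (hpa : pvPr a = i) (hpb : pvPr b = j)
    (hij : i < j) : toLex (pvPr a, a) ≤ toLex (pvPr b, b) := by
  rw [Prod.Lex.le_iff]
  left
  simpa [hpa, hpb] using hij

-- the sort by the lexicographic key is the concatenation of the per-priority sorts
theorem key_sort_decomp (keys : List String) :
    PySem.List.sorted keys (fun k => toLex (pvPr k, k)) false =
      PySem.List.sorted (keys.filter (fun k => pvPr k == 0)) (fun y => y) false ++
      (PySem.List.sorted (keys.filter (fun k => pvPr k == 1)) (fun y => y) false ++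
      (PySem.List.sorted (keys.filter (fun k => pvPr k == 2)) (fun y => y) false ++
       PySem.List.sorted (keys.filter (fun k => pvPr k == 3)) (fun y => y) false)) := by
  have hinj : Function.Injective (fun k : String => toLex (pvPr k, k)) := by
    intro a b h
    simpa using congrArg (fun x => (ofLex x).2) h
  apply PySem.List.eq_of_perm_of_pairwise_le_of_injective _ hinj
  · -- permutation
    have h1 : (keys.filter (fun k => !(pvPr k == 0))).filter (fun k => pvPr k == 1)
        = keys.filter (fun k => pvPr k == 1) := by
      rw [List.filter_filter]
      exact List.filter_congr (by intro x _; rcases pvPr_cases x with h|h|h|h <;> simp [h])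
    have h2 : ((keys.filter (fun k => !(pvPr k == 0))).filter (fun k => !(pvPr k == 1))).filter
          (fun k => pvPr k == 2) = keys.filter (fun k => pvPr k == 2) := by
      rw [List.filter_filter, List.filter_filter]
      exact List.filter_congr (by intro x _; rcases pvPr_cases x with h|h|h|h <;> simp [h])
    have h3 : ((keys.filter (fun k => !(pvPr k == 0))).filter (fun k => !(pvPr k == 1))).filter
          (fun k => !(pvPr k == 2)) = keys.filter (fun k => pvPr k == 3) := by
      rw [List.filter_filter, List.filter_filter]
      exact List.filter_congr (by intro x _; rcases pvPr_cases x with h|h|h|h <;> simp [h])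
    have p0 := List.filter_append_perm (fun k => pvPr k == 0) keys
    have p1 := List.filter_append_perm (fun k => pvPr k == 1)
        (keys.filter (fun k => !(pvPr k == 0)))
    have p2 := List.filter_append_perm (fun k => pvPr k == 2)
        ((keys.filter (fun k => !(pvPr k == 0))).filter (fun k => !(pvPr k == 1)))
    rw [h1] at p1
    rw [h2, h3] at p2
    have hperm : (keys.filter (fun k => pvPr k == 0) ++
        (keys.filter (fun k => pvPr k == 1) ++
        (keys.filter (fun k => pvPr k == 2) ++ keys.filter (fun k => pvPr k == 3)))).Perm keys :=
      ((p2.append_left _).trans p1).append_left _ |>.trans p0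
    have big : (PySem.List.sorted (keys.filter (fun k => pvPr k == 0)) (fun y => y) false ++
      (PySem.List.sorted (keys.filter (fun k => pvPr k == 1)) (fun y => y) false ++
      (PySem.List.sorted (keys.filter (fun k => pvPr k == 2)) (fun y => y) false ++
       PySem.List.sorted (keys.filter (fun k => pvPr k == 3)) (fun y => y) false))).Perm
        (keys.filter (fun k => pvPr k == 0) ++
        (keys.filter (fun k => pvPr k == 1) ++
        (keys.filter (fun k => pvPr k == 2) ++ keys.filter (fun k => pvPr k == 3)))) :=
      (PySem.List.sorted_perm _ _ _).append
        ((PySem.List.sorted_perm _ _ _).append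
          ((PySem.List.sorted_perm _ _ _).append (PySem.List.sorted_perm _ _ _)))
    exact (PySem.List.sorted_perm _ _ _).trans ((hperm.symm).trans big.symm)
  · exact PySem.List.sorted_pairwise _ _
  · -- pairwise on the concatenation
    rw [List.pairwise_append, List.pairwise_append, List.pairwise_append]
    refine ⟨S_pairwise keys 0, ⟨S_pairwise keys 1, ⟨S_pairwise keys 2, S_pairwise keys 3, ?_⟩, ?_⟩, ?_⟩
    · intro a ha b hb
      exact key_le a b (mem_S keys 2 a ha) (mem_S keys 3 b hb) (by norm_num)
    · intro a ha b hb
      rcases List.mem_append.1 hb with hb | hb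
      · exact key_le a b (mem_S keys 1 a ha) (mem_S keys 2 b hb) (by norm_num)
      · exact key_le a b (mem_S keys 1 a ha) (mem_S keys 3 b hb) (by norm_num)
    · intro a ha b hb
      rcases List.mem_append.1 hb with hb | hb
      · exact key_le a b (mem_S keys 0 a ha) (mem_S keys 1 b hb) (by norm_num)
      rcases List.mem_append.1 hb with hb | hb
      · exact key_le a b (mem_S keys 0 a ha) (mem_S keys 2 b hb) (by norm_num)
      · exact key_le a b (mem_S keys 0 a ha) (mem_S keys 3 b hb) (by norm_num)

-- two filters picking the same category are equal
theorem filt (c : String) (i : Int)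
    (hc : ∀ x, pvSuf x = c ↔ pvPr x = i) (keys : List String) :
    keys.filter (fun k => pvSuf k == c) = keys.filter (fun k => pvPr k == i) := by
  refine List.filter_congr ?_
  intro x _
  by_cases h : pvSuf x = c
  · simp [h, (hc x).1 h]
  · have h2 : ¬ pvPr x = i := fun hh => h ((hc x).2 hh)
    simp [h, h2]

theorem main_eq (keys : List String) :
    sort_keys_by_suffix_py keys = sort_keys_by_suffix_py_alt keys := by
  have hsuf : ∀ x, (pvSuf x = "h" ↔ pvPr x = 0) ∧ (pvSuf x = "m" ↔ pvPr x = 1) ∧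
      (pvSuf x = "l" ↔ pvPr x = 2) ∧ (pvSuf x = "other" ↔ pvPr x = 3) := by
    intro x
    rcases pvSuf_pvPr x with ⟨hs,hp⟩|⟨hs,hp⟩|⟨hs,hp⟩|⟨hs,hp⟩ <;>
      refine ⟨⟨?_,?_⟩,⟨?_,?_⟩,⟨?_,?_⟩,⟨?_,?_⟩⟩ <;> simp_all
  unfold sort_keys_by_suffix_py sort_keys_by_suffix_py_alt
  show PySem.List.sorted ((keys.foldl pvStepA pvD0).getD "h" []) (fun x => x) false ++
      PySem.List.sorted ((keys.foldl pvStepA pvD0).getD "m" []) (fun x => x) false ++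
      PySem.List.sorted ((keys.foldl pvStepA pvD0).getD "l" []) (fun x => x) false ++
      PySem.List.sorted ((keys.foldl pvStepA pvD0).getD "other" []) (fun x => x) false =
    PySem.List.sorted2 keys
      (fun k => pvKeyB (PySem.Dict.ofList [("h", (0:Int)), ("m", 1), ("l", 2)]) k)
      (fun k => k) false
  simp only [List.append_assoc]
  rw [show (fun k => pvKeyB (PySem.Dict.ofList [("h", (0:Int)), ("m", 1), ("l", 2)]) k) = pvPr
        from funext pvPr_alt, sorted2_eq_sorted_lex, key_sort_decomp,
      bucketA keys "h", bucketA keys "m", bucketA keys "l", bucketA keys "other",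
      filt "h" 0 (fun x => (hsuf x).1) keys, filt "m" 1 (fun x => (hsuf x).2.1) keys,
      filt "l" 2 (fun x => (hsuf x).2.2.1) keys, filt "other" 3 (fun x => (hsuf x).2.2.2) keys]

-- ===== VERDICT (by name: the statement is the Claim_ definition above) =====
theorem sort_keys_by_suffix_py_spec : Claim_equal_sort_keys_by_suffix_py := by
  intro keys _ _
  exact main_eq keys
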